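-- pv_equiv track=rewrite | github.com/BigBIueWhale/deep_intent_search | rerank.py | build_topblock_ids
-- ===== SOURCE A (Python) =====
-- from typing import Dict, List, Tuple, Optional, Set
--
-- def build_topblock_ids(tier_map: Dict[int,int], skeleton_order: List[int], top_limit: int) -> Tuple[List[int], List[int], bool, Optional[str]]:
--     """
--     Build top block by taking whole tiers starting from 0 until adding another tier would exceed 'top_limit',
--     and include the skeleton anchors that lie between included tiers.
--
--     Tier convention reminder:
--       - Tier 0 is **above** skeleton[0] (more relevant than the most-relevant anchor).
--       - Between Tier t and Tier t+1 sits skeleton[t], for t in [0..S-1].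
--
--     Returns (topblock_ids, tiers_included, skipped, reason_if_skipped).
--     If Tier 0 alone > top_limit -> skipped=True, reason non-null, ids=[].
--     """
--     S = len(skeleton_order)
--     # collect items per tier (non-skeleton)
--     tiers: Dict[int, List[int]] = {}
--     for oi, t in tier_map.items():
--         tiers.setdefault(t, []).append(oi)
--
--     # size of Tier 0 only (no anchors needed if we include only Tier 0)
--     if len(tiers.get(0, [])) > top_limit:
--         return [], [0], True, f"Tier 0 has {len(tiers.get(0, []))} items (> {top_limit}); skipping Step 3."
--
--     included_consecutive: List[int] = []
--     # helper: how many anchors lie *between* tiers 0..t (inclusive)?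
--     # If we include tiers 0..t consecutively, there are exactly t anchors: skeleton[0..t-1].
--     def anchors_between_up_to(t: int) -> int:
--         return max(0, min(t, S))
--
--     # Greedily include tiers from 0 up while respecting the cap using the *same* counting as materialization.
--     for t in range(0, S + 1):
--         total_items = sum(len(tiers.get(k, [])) for k in range(0, t + 1))
--         total_anchors = anchors_between_up_to(t)
--         projected = total_items + total_anchors
--         if projected <= top_limit:
--             included_consecutive.append(t)
--         else:
--             break
--
--     if not included_consecutive:
--         included_consecutive = [0]  # sanity; shouldn't happen due to Tier-0 check
--
--     # Materialize: [Tier0] + [skeleton[0]] + [Tier1] + [skeleton[1]] + ... BUT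
--     # include an anchor *only between* two included tiers.
--     top_ids: List[int] = []
--     last_t = included_consecutive[-1]
--     for t in included_consecutive:
--         # items in tier t
--         top_ids.extend(sorted(tiers.get(t, [])))
--         # anchor after tier t only if the next tier t+1 is also included
--         if t < S and (t + 1) in included_consecutive:
--             top_ids.append(skeleton_order[t])
--
--     # Safety check: enforce the cap deterministically (should already hold by construction).
--     if len(top_ids) > top_limit:
--         # Trim from the end (removes last-added elements deterministically).
--         while len(top_ids) > top_limit:
--             top_ids.pop()
--
--     tiers_included = included_consecutive
--     return top_ids, tiers_included, False, None
-- ===== SOURCE B (Python) =====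
-- from typing import Dict, List, Tuple, Optional
--
--
-- def build_topblock_ids(tier_map: Dict[int, int], skeleton_order: List[int], top_limit: int) -> Tuple[List[int], List[int], bool, Optional[str]]:
--     """Single-pass greedy: a running cumulative item count replaces A's
--     per-step re-summation; tiers 0..T are then materialized directly."""
--     S = len(skeleton_order)
--     tiers: Dict[int, List[int]] = {}
--     for oi, t in tier_map.items():
--         tiers.setdefault(t, []).append(oi)
--
--     n0 = len(tiers.get(0, []))
--     if n0 > top_limit:
--         return [], [0], True, f"Tier 0 has {n0} items (> {top_limit}); skipping Step 3."
--
--     # T = last included tier; cum = total items in tiers 0..T (running sum).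
--     T = 0
--     cum = n0
--     for t in range(1, S + 1):
--         c = len(tiers.get(t, []))
--         if cum + c + t > top_limit:
--             break
--         T = t
--         cum += c
--
--     top_ids: List[int] = []
--     for t in range(T + 1):
--         top_ids.extend(sorted(tiers.get(t, [])))
--         if t < T:
--             top_ids.append(skeleton_order[t])
--     return top_ids, list(range(T + 1)), False, None
-- ===== Notes on version B (the rewrite author's own statement) =====
-- stated objective: alternative
-- what changed: The greedy tier loop keeps a running cumulative item count (one pass over tiers) instead of re-summing all previous tiers at each step, and materializes tiers 0..T directly with a 't < T' test in place of A's membership scan plus trailing trim loop.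
import Mathlib
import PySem

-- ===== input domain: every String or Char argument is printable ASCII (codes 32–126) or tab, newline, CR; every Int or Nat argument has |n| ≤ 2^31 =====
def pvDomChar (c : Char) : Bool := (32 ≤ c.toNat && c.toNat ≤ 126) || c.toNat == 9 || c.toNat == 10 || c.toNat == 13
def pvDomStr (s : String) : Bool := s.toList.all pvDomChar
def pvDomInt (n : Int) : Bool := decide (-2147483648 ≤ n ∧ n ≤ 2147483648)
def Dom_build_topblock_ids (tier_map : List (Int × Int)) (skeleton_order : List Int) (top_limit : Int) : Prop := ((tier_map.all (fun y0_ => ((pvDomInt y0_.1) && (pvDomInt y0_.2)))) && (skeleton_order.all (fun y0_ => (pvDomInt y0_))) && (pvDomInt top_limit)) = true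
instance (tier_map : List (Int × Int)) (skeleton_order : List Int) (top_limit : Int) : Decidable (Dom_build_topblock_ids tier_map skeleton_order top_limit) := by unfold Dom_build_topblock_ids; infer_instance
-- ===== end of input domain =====

-- B replaces A's re-summed greedy tier loop by a single pass with a running cumulative
-- count and materializes the included tiers directly (alternative decomposition, same results).


-- shared with PORT B: the Python dict argument (assoc list under the type convention,
-- later duplicate keys overwrite) and the identical grouping loop
-- 'for oi, t in tier_map.items(): tiers.setdefault(t, []).append(oi)' both sources contain
def pvTiers (tier_map : List (Int × Int)) : PySem.Dict Int (List Int) :=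
  let d := tier_map.foldl (fun d kv => d.insert kv.1 kv.2) PySem.Dict.empty
  d.items.foldl (fun acc p => acc.modify p.2 [] (· ++ [p.1])) PySem.Dict.empty

-- ===== PORT A =====
-- total_items = sum(len(tiers.get(k, [])) for k in range(0, t + 1))
def pvTotalItems (tiers : PySem.Dict Int (List Int)) (t : Int) : Int :=
  (PySem.List.pyRange 0 (t + 1) 1).foldl (fun s k => s + ((tiers.getD k []).length : Int)) 0

-- the greedy 'for t in range(0, S+1): … else: break' loop (break = stop recursing)
def pvALoop (tiers : PySem.Dict Int (List Int)) (S top_limit : Int) :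
    List Int → List Int → List Int
  | [], acc => acc
  | t :: rest, acc =>
    if pvTotalItems tiers t + max 0 (min t S) ≤ top_limit then
      pvALoop tiers S top_limit rest (acc ++ [t])
    else acc

-- 'while len(top_ids) > top_limit: top_ids.pop()'; Python raises IndexError when the
-- list is empty and still above the cap — that point is unreachable for A (proved below),
-- the 'ids = []' branch value is arbitrary.
def pvTrim (top_limit : Int) (ids : List Int) : List Int :=
  if _h : top_limit < (ids.length : Int) then
    if hn : ids = [] then []
    else pvTrim top_limit ids.dropLast
  else ids
termination_by ids.length
decreasing_by have := List.length_pos_iff.mpr hn; simp [List.length_dropLast]; omega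

def build_topblock_ids (tier_map : List (Int × Int)) (skeleton_order : List Int) (top_limit : Int) : List Int × List Int × Bool × Option String :=
  let S : Int := (skeleton_order.length : Int)
  let tiers := pvTiers tier_map
  if top_limit < ((tiers.getD 0 []).length : Int) then
    ([], [0], true,
      some ("Tier 0 has " ++ PySem.Int.toStr ((tiers.getD 0 []).length : Int) ++
        " items (> " ++ PySem.Int.toStr top_limit ++ "); skipping Step 3."))
  else
    let included0 := pvALoop tiers S top_limit (PySem.List.pyRange 0 (S + 1) 1) []
    let included := if included0 = [] then [(0 : Int)] else included0
    -- materialize; 'skeleton_order[t]' is in range here (t < S), pyGetD default unreachable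
    let top_ids := included.foldl (fun ids t =>
      let ids := ids ++ PySem.List.sorted (tiers.getD t []) (fun x => x) false
      if decide (t < S) && included.contains (t + 1) then
        ids ++ [PySem.List.pyGetD skeleton_order t 0]
      else ids) []
    (pvTrim top_limit top_ids, included, false, none)

-- ===== PORT B =====
-- single pass: state (T, cum) = (last included tier, items in tiers 0..T)
def pvBLoop (tiers : PySem.Dict Int (List Int)) (top_limit : Int) :
    List Int → Int × Int → Int × Int
  | [], st => st
  | t :: rest, (T, cum) =>
    let c : Int := ((tiers.getD t []).length : Int)
    if top_limit < cum + c + t then (T, cum)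
    else pvBLoop tiers top_limit rest (t, cum + c)

def build_topblock_ids_alt (tier_map : List (Int × Int)) (skeleton_order : List Int) (top_limit : Int) : List Int × List Int × Bool × Option String :=
  let S : Int := (skeleton_order.length : Int)
  let tiers := pvTiers tier_map
  let n0 : Int := ((tiers.getD 0 []).length : Int)
  if top_limit < n0 then
    ([], [0], true,
      some ("Tier 0 has " ++ PySem.Int.toStr n0 ++
        " items (> " ++ PySem.Int.toStr top_limit ++ "); skipping Step 3."))
  else
    let T := (pvBLoop tiers top_limit (PySem.List.pyRange 1 (S + 1) 1) (0, n0)).1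
    -- 'skeleton_order[t]' is in range here (t < T ≤ S), pyGetD default unreachable
    let top_ids := (PySem.List.pyRange 0 (T + 1) 1).foldl (fun ids t =>
      let ids := ids ++ PySem.List.sorted (tiers.getD t []) (fun x => x) false
      if decide (t < T) then ids ++ [PySem.List.pyGetD skeleton_order t 0] else ids) []
    (top_ids, PySem.List.pyRange 0 (T + 1) 1, false, none)

-- ===== PRECONDITION & SPEC =====
def Spec_build_topblock_ids (tier_map : List (Int × Int)) (skeleton_order : List Int) (top_limit : Int) (out : List Int × List Int × Bool × Option String) : Prop := out = build_topblock_ids_alt tier_map skeleton_order top_limit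
instance (tier_map : List (Int × Int)) (skeleton_order : List Int) (top_limit : Int) (out : List Int × List Int × Bool × Option String) : Decidable (Spec_build_topblock_ids tier_map skeleton_order top_limit out) := by unfold Spec_build_topblock_ids; infer_instance

-- ===== CLAIM (what is proved, stated in full; the proofs are below) =====
def Claim_equal_build_topblock_ids : Prop := ∀ (tier_map : List (Int × Int)) (skeleton_order : List Int) (top_limit : Int), Dom_build_topblock_ids tier_map skeleton_order top_limit → Spec_build_topblock_ids tier_map skeleton_order top_limit (build_topblock_ids tier_map skeleton_order top_limit)


-- ===== LEMMAS AND PROOFS =====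

-- item count of one tier (proof-only abbreviation)
def pvCnt (tiers : PySem.Dict Int (List Int)) (t : Int) : Int := ((tiers.getD t []).length : Int)

-- the materialization step both ports perform for one tier (proof-only name for the shared lambda)
def pvStepB (tiers : PySem.Dict Int (List Int)) (skel : List Int) (T : Int)
    (ids : List Int) (t : Int) : List Int :=
  let ids2 := ids ++ PySem.List.sorted (tiers.getD t []) (fun x => x) false
  if decide (t < T) then ids2 ++ [PySem.List.pyGetD skel t 0] else ids2

lemma pvTotalItems_zero (tiers : PySem.Dict Int (List Int)) :
    pvTotalItems tiers 0 = pvCnt tiers 0 := by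
  have h : PySem.List.pyRange 0 1 1 = [0] := by decide
  simp [pvTotalItems, h, pvCnt]

lemma pvTotalItems_succ (tiers : PySem.Dict Int (List Int)) (t : Int) (ht : 0 ≤ t) :
    pvTotalItems tiers (t + 1) = pvTotalItems tiers t + pvCnt tiers (t + 1) := by
  unfold pvTotalItems
  rw [PySem.List.pyRange_one_succ_right (show (0:Int) ≤ t + 1 by omega), List.foldl_append]
  simp [pvCnt]

-- A's for-with-break loop is takeWhile of its projected-size test
lemma pvALoop_eq (tiers : PySem.Dict Int (List Int)) (S top : Int) :
    ∀ (ts acc : List Int), pvALoop tiers S top ts acc =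
      acc ++ ts.takeWhile (fun t => decide (pvTotalItems tiers t + max 0 (min t S) ≤ top)) := by
  intro ts
  induction ts with
  | nil => intro acc; simp [pvALoop]
  | cons t rest ih =>
    intro acc
    simp only [pvALoop, List.takeWhile_cons]
    by_cases h : pvTotalItems tiers t + max 0 (min t S) ≤ top
    · simp [h, ih]
    · simp [h]

-- the two loops' boolean tests agree on the traversed range
lemma pvTakeWhile_congr (l : List Int) (p q : Int → Bool) (h : ∀ x ∈ l, p x = q x) :
    l.takeWhile p = l.takeWhile q := by
  induction l with
  | nil => rfl
  | cons a t ih =>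
    simp only [List.takeWhile_cons, h a (by simp)]
    cases hq : q a <;> simp [ih (fun x hx => h x (by simp [hx]))]

-- a takeWhile-prefix of a consecutive range is itself a consecutive range
lemma pvTakeWhile_pyRange (p : Int → Bool) :
    ∀ (n : Nat) (a b : Int), b - a = (n : Int) →
      (PySem.List.pyRange a b 1).takeWhile p =
        PySem.List.pyRange a (a + (((PySem.List.pyRange a b 1).takeWhile p).length : Int)) 1 := by
  intro n
  induction n with
  | zero =>
    intro a b hb
    rw [PySem.List.pyRange_one_eq_nil (by omega)]
    simp
  | succ n ih =>
    intro a b hb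
    rw [PySem.List.pyRange_one_cons (by omega : a < b), List.takeWhile_cons]
    cases hp : p a
    · simp
    · rw [if_pos rfl]
      have key := ih (a + 1) b (by push_cast at hb ⊢; omega)
      have hnn : (0:Int) ≤ (((PySem.List.pyRange (a+1) b 1).takeWhile p).length : Int) :=
        Int.natCast_nonneg _
      simp only [List.length_cons]
      push_cast
      rw [show a + ((((PySem.List.pyRange (a+1) b 1).takeWhile p).length : Int) + 1)
            = (a + 1) + (((PySem.List.pyRange (a+1) b 1).takeWhile p).length : Int) by ring]
      rw [PySem.List.pyRange_one_cons
        (show a < a + 1 + (((PySem.List.pyRange (a+1) b 1).takeWhile p).length : Int) by omega)]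
      exact congrArg (a :: ·) key

-- B's running-sum loop stops at the same first failing tier
lemma pvBLoop_eq (tiers : PySem.Dict Int (List Int)) (top : Int) :
    ∀ (n : Nat) (T m : Int), 0 ≤ T → m - (T + 1) = (n : Int) →
      (pvBLoop tiers top (PySem.List.pyRange (T + 1) m 1) (T, pvTotalItems tiers T)).1 =
        T + (((PySem.List.pyRange (T + 1) m 1).takeWhile
          (fun t => decide (pvTotalItems tiers t + t ≤ top))).length : Int) := by
  intro n
  induction n with
  | zero =>
    intro T m hT hm
    rw [PySem.List.pyRange_one_eq_nil (by omega)]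
    simp [pvBLoop]
  | succ n ih =>
    intro T m hT hm
    rw [PySem.List.pyRange_one_cons (by omega : T + 1 < m), List.takeWhile_cons]
    simp only [pvBLoop]
    have hps : pvTotalItems tiers T + pvCnt tiers (T + 1) = pvTotalItems tiers (T + 1) :=
      (pvTotalItems_succ tiers T hT).symm
    unfold pvCnt at hps
    by_cases h : top < pvTotalItems tiers T + ((tiers.getD (T+1) []).length : Int) + (T + 1)
    · have hq : ¬ (pvTotalItems tiers (T+1) + (T+1) ≤ top) := by omega
      simp [h, hq]
    · have hq : pvTotalItems tiers (T+1) + (T+1) ≤ top := by omega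
      simp only [h, if_false, hq, decide_true, if_true]
      rw [hps]
      have hrec := ih (T + 1) m (by omega) (by push_cast at hm ⊢; omega)
      rw [hrec]
      simp only [List.length_cons]
      push_cast
      ring

-- length of the materialized block: items of tiers 0..n plus one anchor per adjacent included pair
lemma pvMatLen (tiers : PySem.Dict Int (List Int)) (skel : List Int) (T : Int) (hT : 0 ≤ T) :
    ∀ n : Nat,
      ((((PySem.List.pyRange 0 ((n : Int) + 1) 1).foldl (pvStepB tiers skel T) []).length : Int)
        = pvTotalItems tiers (n : Int) + min ((n : Int) + 1) T) := by
  intro n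
  induction n with
  | zero =>
    have h : PySem.List.pyRange 0 1 1 = [0] := by decide
    simp only [Nat.cast_zero, zero_add, h, List.foldl_cons, List.foldl_nil, pvStepB]
    rw [pvTotalItems_zero]
    unfold pvCnt
    by_cases h0 : (0:Int) < T
    · simp [h0]; omega
    · simp [h0]; omega
  | succ n ih =>
    push_cast
    rw [show ((n:Int) + 1 + 1) = ((n:Int) + 1) + 1 by ring,
      PySem.List.pyRange_one_succ_right (show (0:Int) ≤ (n:Int) + 1 by omega),
      List.foldl_append]
    simp only [List.foldl_cons, List.foldl_nil]
    rw [pvTotalItems_succ tiers ((n:Int)) (by omega)]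
    rw [show pvCnt tiers ((n:Int) + 1) = ((tiers.getD ((n:Int) + 1) []).length : Int) from rfl]
    simp only [pvStepB]
    push_cast at ih ⊢
    by_cases h1 : (n:Int) + 1 < T
    · simp only [h1, decide_true, if_true]
      simp only [List.length_append, List.length_cons, List.length_nil,
        PySem.List.length_sorted]
      push_cast
      omega
    · simp only [h1, decide_false, Bool.false_eq_true, if_false]
      simp only [List.length_append, PySem.List.length_sorted]
      push_cast
      omega

-- ===== VERDICT (by name: the statement is the Claim_ definition above) =====
theorem build_topblock_ids_spec : Claim_equal_build_topblock_ids := by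
  unfold Claim_equal_build_topblock_ids
  intro tier_map skeleton_order top_limit _
  unfold Spec_build_topblock_ids build_topblock_ids build_topblock_ids_alt
  set S : Int := (skeleton_order.length : Int) with hSdef
  set tiers := pvTiers tier_map with htiers
  have hS0 : (0:Int) ≤ S := Int.natCast_nonneg _
  by_cases hskip : top_limit < ((tiers.getD 0 []).length : Int)
  · simp only [hskip, if_true]
  · simp only [hskip, if_false]
    set Q : Int → Bool := fun t => decide (pvTotalItems tiers t + t ≤ top_limit) with hQ
    set tw := (PySem.List.pyRange 1 (S+1) 1).takeWhile Q with htw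
    set T : Int := (tw.length : Int) with hTdef
    have hT0 : (0:Int) ≤ T := Int.natCast_nonneg _
    have hn0 : pvTotalItems tiers 0 = ((tiers.getD 0 []).length : Int) := pvTotalItems_zero tiers
    have hTS : T ≤ S := by
      have h1 : tw.length ≤ (PySem.List.pyRange 1 (S+1) 1).length :=
        (List.takeWhile_sublist Q).length_le
      rw [PySem.List.length_pyRange_one] at h1
      have h2 : ((S + 1 - 1).toNat : Int) = S := by omega
      omega
    -- A's greedy loop result
    have hincA : pvALoop tiers S top_limit (PySem.List.pyRange 0 (S+1) 1) [] = 0 :: tw := by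
      rw [pvALoop_eq, PySem.List.pyRange_one_cons (by omega : (0:Int) < S + 1),
        List.takeWhile_cons]
      have hp0 : (pvTotalItems tiers 0 + max 0 (min 0 S) ≤ top_limit) := by
        rw [hn0]
        have : max 0 (min 0 S) = 0 := by omega
        omega
      rw [decide_eq_true hp0, if_pos rfl, List.nil_append]
      refine congrArg (0 :: ·) ?_
      rw [htw]
      exact pvTakeWhile_congr _ _ _ (fun x hx => by
        rw [PySem.List.mem_pyRange_one] at hx
        have hmx : max 0 (min x S) = x := by omega
        rw [hQ, hmx])
    -- tw is itself a consecutive range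
    have htw_range : tw = PySem.List.pyRange 1 (1 + T) 1 := by
      have h := pvTakeWhile_pyRange Q S.toNat 1 (S+1) (by omega)
      rw [← htw] at h
      exact h
    have hrange0 : (0 : Int) :: tw = PySem.List.pyRange 0 (T+1) 1 := by
      have hcons := PySem.List.pyRange_one_cons (show (0:Int) < T + 1 by omega)
      rw [show (0:Int) + 1 = 1 from rfl] at hcons
      rw [htw_range, show (1:Int) + T = T + 1 by ring, ← hcons]
    -- B's loop result
    have hB : (pvBLoop tiers top_limit (PySem.List.pyRange 1 (S+1) 1)
        (0, ((tiers.getD 0 []).length : Int))).1 = T := by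
      rw [← hn0]
      have h := pvBLoop_eq tiers top_limit S.toNat 0 (S+1) le_rfl (by omega)
      rw [show (0:Int) + 1 = 1 from rfl] at h
      rw [h, ← hQ, ← htw, hTdef]
      ring
    -- Q holds at T (so the materialized block fits the cap)
    have hQT : pvTotalItems tiers T + T ≤ top_limit := by
      by_cases hTz : T = 0
      · rw [hTz, hn0]; omega
      · have hmem : T ∈ tw := by
          rw [htw_range, PySem.List.mem_pyRange_one]
          omega
        have := List.mem_takeWhile_imp (htw ▸ hmem)
        rw [hQ] at this
        exact of_decide_eq_true this
    -- materialized block and its length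
    have hmatlen : (((PySem.List.pyRange 0 (T+1) 1).foldl
        (pvStepB tiers skeleton_order T) []).length : Int) = pvTotalItems tiers T + T := by
      have h := pvMatLen tiers skeleton_order T hT0 T.toNat
      rw [Int.toNat_of_nonneg hT0] at h
      rw [h]
      omega
    rw [hincA]
    have hne : ((0:Int) :: tw ≠ []) := by simp
    simp only [hne, if_false, hB]
    rw [hrange0]
    -- A's materialization step equals the shared step on the traversed range
    have hmatA : (PySem.List.pyRange 0 (T+1) 1).foldl (fun ids t =>
        let ids2 := ids ++ PySem.List.sorted (tiers.getD t []) (fun x => x) false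
        if decide (t < S) && (PySem.List.pyRange 0 (T+1) 1).contains (t + 1) then
          ids2 ++ [PySem.List.pyGetD skeleton_order t 0]
        else ids2) [] =
        (PySem.List.pyRange 0 (T+1) 1).foldl (pvStepB tiers skeleton_order T) [] := by
      refine PySem.List.foldl_congr_mem _ _ _ _ (fun acc x hx => ?_)
      rw [PySem.List.mem_pyRange_one] at hx
      have hc : ((PySem.List.pyRange 0 (T+1) 1).contains (x + 1)) = decide (x < T) := by
        simp only [List.contains_eq_mem, PySem.List.mem_pyRange_one]
        exact decide_eq_decide.mpr (by omega)
      rw [pvStepB, hc]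
      by_cases hxT : x < T
      · have hxS : x < S := by omega
        simp [hxT, hxS]
      · simp [hxT]
    rw [hmatA]
    -- the trim loop is a no-op: the block already fits
    rw [pvTrim]
    rw [dif_neg (by rw [hmatlen]; omega)]
    have hstep : (fun (ids : List Int) (t : Int) =>
        if decide (t < T) = true then
          (ids ++ PySem.List.sorted (tiers.getD t []) (fun x => x) false) ++
            [PySem.List.pyGetD skeleton_order t 0]
        else ids ++ PySem.List.sorted (tiers.getD t []) (fun x => x) false) =
        pvStepB tiers skeleton_order T := by
      funext ids t
      simp [pvStepB]
    rw [hstep]
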